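-- pv_equiv track=rewrite | github.com/xianyi11/ELSA | ELSA_Simluator/convolution/elsa_support/resnet50_metrics.py | _looks_like_vgg_calculate_info
-- ===== SOURCE A (Python) =====
-- from typing import Any, Dict, Optional
--
-- def _looks_like_vgg_calculate_info(info: Dict[str, Any]) -> bool:
--     """Heuristic: VGG exports use ``features.*`` + ``classifier`` names; path may contain ``vgg``."""
--     keys = [str(k) for k in info.keys() if k != "transmitTraffic"]
--     joined = " ".join(keys).lower()
--     if "vgg" in joined:
--         return True
--     has_features = any(k.startswith("features.") for k in keys)
--     has_classifier = any("classifier" in k for k in keys)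
--     return bool(has_features and has_classifier)
-- ===== SOURCE B (Python) =====
-- def _looks_like_vgg_calculate_info(info):
--     """Single combined pass over the keys with two flags and an early return."""
--     has_features = False
--     has_classifier = False
--     for k in info:
--         s = str(k)
--         if s == "transmitTraffic":
--             continue
--         if "vgg" in s.lower():
--             return True
--         if s.startswith("features."):
--             has_features = True
--         if "classifier" in s:
--             has_classifier = True
--     return has_features and has_classifier
-- ===== Notes on version B (the rewrite author's own statement) =====
-- stated objective: simpler
-- what changed: Replaced the build-list/join-and-lower/substring-scan plus two separate any() passes with one loop over the keys that keeps two flags and returns True early on a 'vgg' key.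
import Mathlib
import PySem

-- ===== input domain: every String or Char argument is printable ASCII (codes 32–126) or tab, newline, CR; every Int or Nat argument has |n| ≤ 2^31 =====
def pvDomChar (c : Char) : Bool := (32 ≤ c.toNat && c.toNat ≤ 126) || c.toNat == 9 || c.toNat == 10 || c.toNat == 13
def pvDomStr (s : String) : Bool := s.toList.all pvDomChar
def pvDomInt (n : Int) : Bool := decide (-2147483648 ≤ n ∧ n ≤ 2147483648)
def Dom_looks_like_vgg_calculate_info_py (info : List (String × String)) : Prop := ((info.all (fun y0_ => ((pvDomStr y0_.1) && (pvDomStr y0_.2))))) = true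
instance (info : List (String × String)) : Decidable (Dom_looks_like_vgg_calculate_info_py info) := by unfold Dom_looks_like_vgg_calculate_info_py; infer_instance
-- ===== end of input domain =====

-- B replaces A's build-list / join-and-lower / substring scan plus two any() passes by a single
-- loop over the keys keeping two flags, returning True early on a 'vgg' key (objective: simpler).

-- ===== PORT A =====
-- keys = [str(k) for k in info.keys() if k != "transmitTraffic"]; joined = " ".join(keys).lower();
-- if "vgg" in joined: return True; return bool(has_features and has_classifier)
def looks_like_vgg_calculate_info_py (info : List (String × String)) : Bool :=
  let keys := ((PySem.Dict.ofList info).keys).foldl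
    (fun acc k => if k != "transmitTraffic" then acc ++ [k] else acc) []
  let joined := PySem.Str.lower (PySem.Str.join " " keys)
  if PySem.Str.isIn "vgg" joined then
    true
  else
    let has_features := keys.any (fun k => PySem.Str.startswith k "features.")
    let has_classifier := keys.any (fun k => PySem.Str.isIn "classifier" k)
    has_features && has_classifier

-- ===== PORT B =====
-- the single pass of Source B: two flags, continue on "transmitTraffic", early return on "vgg"
def pvAltLoop : List String → Bool → Bool → Bool
  | [], has_features, has_classifier => has_features && has_classifier
  | k :: rest, has_features, has_classifier =>
    if k == "transmitTraffic" then
      pvAltLoop rest has_features has_classifier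
    else if PySem.Str.isIn "vgg" (PySem.Str.lower k) then
      true
    else
      pvAltLoop rest (has_features || PySem.Str.startswith k "features.")
                     (has_classifier || PySem.Str.isIn "classifier" k)

def looks_like_vgg_calculate_info_py_alt (info : List (String × String)) : Bool :=
  pvAltLoop ((PySem.Dict.ofList info).keys) false false

-- ===== PRECONDITION & SPEC =====
def Spec_looks_like_vgg_calculate_info_py (info : List (String × String)) (out : Bool) : Prop := out = looks_like_vgg_calculate_info_py_alt info
instance (info : List (String × String)) (out : Bool) : Decidable (Spec_looks_like_vgg_calculate_info_py info out) := by unfold Spec_looks_like_vgg_calculate_info_py; infer_instance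

-- ===== CLAIM (what is proved, stated in full; the proofs are below) =====
def Claim_equal_looks_like_vgg_calculate_info_py : Prop := ∀ (info : List (String × String)), Dom_looks_like_vgg_calculate_info_py info → Spec_looks_like_vgg_calculate_info_py info (looks_like_vgg_calculate_info_py info)

-- ===== LEMMAS AND PROOFS =====

-- a prefix that avoids c stops before c
theorem pv_prefix_split {α : Type} (c : α) :
    ∀ (sub x y : List α), c ∉ sub → sub <+: x ++ c :: y → sub <+: x := by
  intro sub
  induction sub with
  | nil => intro x y _ _; exact List.nil_prefix
  | cons s0 t ih =>
    intro x y hc h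
    cases x with
    | nil =>
      rw [List.nil_append, List.cons_prefix_cons] at h
      exact absurd (h.1 ▸ List.mem_cons_self) hc
    | cons b x' =>
      rw [List.cons_append, List.cons_prefix_cons] at h
      exact List.cons_prefix_cons.mpr
        ⟨h.1, ih x' y (fun m => hc (List.mem_cons_of_mem _ m)) h.2⟩

-- an infix that avoids the separator lies entirely on one side
theorem pv_infix_split {α : Type} (sub : List α) (c : α) (hc : c ∉ sub) :
    ∀ (x y : List α), sub <:+: x ++ c :: y ↔ sub <:+: x ∨ sub <:+: y := by
  intro x y
  constructor
  · induction x with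
    | nil =>
      intro h
      rcases List.infix_cons_iff.mp (by simpa using h) with hp | hi
      · cases sub with
        | nil => exact Or.inl List.nil_infix
        | cons s0 t =>
          rcases List.cons_prefix_cons.mp hp with ⟨e, _⟩
          exact absurd (e ▸ List.mem_cons_self) hc
      · exact Or.inr hi
    | cons a x' ih =>
      intro h
      rcases List.infix_cons_iff.mp (by simpa using h) with hp | hi
      · have : sub <+: a :: x' := by
          cases sub with
          | nil => exact List.nil_prefix
          | cons s0 t =>
            rcases List.cons_prefix_cons.mp hp with ⟨e, hp'⟩
            exact List.cons_prefix_cons.mpr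
              ⟨e, pv_prefix_split c t x' y (fun m => hc (List.mem_cons_of_mem _ m)) hp'⟩
        exact Or.inl this.isInfix
      · rcases ih hi with h1 | h2
        · exact Or.inl (h1.trans (List.suffix_cons a x').isInfix)
        · exact Or.inr h2
  · rintro (h | h)
    · exact h.trans (List.prefix_append x (c :: y)).isInfix
    · exact h.trans ((List.suffix_cons c y).trans (List.suffix_append x (c :: y))).isInfix

-- lowering a space-join lowers each part (lowerChar keeps ' ')
theorem pv_lower_join (keys : List String) :
    PySem.Chars.lower (PySem.Chars.join [' '] (keys.map String.toList)) =
      PySem.Chars.join [' '] (keys.map (fun k => PySem.Chars.lower k.toList)) := by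
  induction keys with
  | nil => rfl
  | cons k rest ih =>
    cases rest with
    | nil =>
      simp only [List.map_cons, List.map_nil, PySem.Chars.join_singleton]
    | cons k2 rest' =>
      have hsp : List.map PySem.Chars.lowerChar [' '] = [' '] := by decide
      simp only [List.map_cons, PySem.Chars.lower] at ih ⊢
      rw [PySem.Chars.join_cons_cons, PySem.Chars.join_cons_cons,
        List.map_append, List.map_append, hsp, ih]

-- 'vgg' sits inside a space-join iff it sits inside one of the parts
theorem pv_infix_join (parts : List (List Char)) :
    (['v', 'g', 'g'] : List Char) <:+: PySem.Chars.join [' '] parts ↔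
      ∃ p ∈ parts, (['v', 'g', 'g'] : List Char) <:+: p := by
  induction parts with
  | nil => simp [PySem.Chars.join, List.intercalate]
  | cons p rest ih =>
    cases rest with
    | nil => simp [PySem.Chars.join, List.intercalate]
    | cons q rest' =>
      rw [PySem.Chars.join_cons_cons, List.append_assoc, List.singleton_append,
        pv_infix_split _ ' ' (by decide), ih]
      simp only [List.mem_cons]
      constructor
      · rintro (h | ⟨r, hr, h⟩)
        · exact ⟨p, Or.inl rfl, h⟩
        · exact ⟨r, Or.inr hr, h⟩
      · rintro ⟨r, (rfl | hr), h⟩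
        · exact Or.inl h
        · exact Or.inr ⟨r, hr, h⟩

-- A's joined-string test is a per-key test
theorem pv_vgg_join (keys : List String) :
    PySem.Str.isIn "vgg" (PySem.Str.lower (PySem.Str.join " " keys)) =
      keys.any (fun k => PySem.Str.isIn "vgg" (PySem.Str.lower k)) := by
  rw [Bool.eq_iff_iff, PySem.Str.isIn_iff_infix, PySem.Str.toList_lower,
    PySem.Str.toList_join, List.any_eq_true]
  have hsp : (" " : String).toList = [' '] := by decide
  have hv : ("vgg" : String).toList = ['v', 'g', 'g'] := by decide
  rw [hsp, hv, pv_lower_join, pv_infix_join]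
  constructor
  · rintro ⟨p, hp, h⟩
    rw [List.mem_map] at hp
    obtain ⟨k, hk, rfl⟩ := hp
    exact ⟨k, hk, by rw [PySem.Str.isIn_iff_infix, PySem.Str.toList_lower, hv]; exact h⟩
  · rintro ⟨k, hk, h⟩
    rw [PySem.Str.isIn_iff_infix, PySem.Str.toList_lower, hv] at h
    exact ⟨PySem.Chars.lower k.toList, List.mem_map.mpr ⟨k, hk, rfl⟩, h⟩

-- what B's loop computes, as a closed form over the key list
theorem pv_altLoop_eq (ks : List String) :
    ∀ (hf hc : Bool), pvAltLoop ks hf hc =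
      ((ks.any (fun k => k != "transmitTraffic" && PySem.Str.isIn "vgg" (PySem.Str.lower k))) ||
        ((hf || (ks.filter (fun k => k != "transmitTraffic")).any
            (fun k => PySem.Str.startswith k "features.")) &&
         (hc || (ks.filter (fun k => k != "transmitTraffic")).any
            (fun k => PySem.Str.isIn "classifier" k)))) := by
  induction ks with
  | nil => intro hf hc; simp [pvAltLoop]
  | cons k rest ih =>
    intro hf hc
    by_cases htt : k == "transmitTraffic"
    · have hne : (k != "transmitTraffic") = false := by simp [bne, htt]
      simp only [pvAltLoop, htt, if_true, List.any_cons, List.filter_cons, hne,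
        Bool.false_and, Bool.false_or, if_neg, Bool.false_eq_true, not_false_eq_true]
      exact ih hf hc
    · have hne : (k != "transmitTraffic") = true := by simp [bne, htt]
      by_cases hv : PySem.Str.isIn "vgg" (PySem.Str.lower k)
      · have hv' : PySem.Chars.isIn ['v', 'g', 'g'] (PySem.Chars.lower k.toList) = true := by
          simpa using hv
        simp only [pvAltLoop]
        rw [if_neg htt, if_pos hv]
        simp [List.any_cons, hv']
        exact Or.inl (Or.inl (by simpa using htt))
      · simp only [pvAltLoop, htt, Bool.false_eq_true, not_false_eq_true,
          if_neg, hv, List.any_cons, List.filter_cons, hne, if_pos,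
          Bool.and_false, Bool.false_or]
        rw [ih]
        simp [Bool.or_assoc]

-- ===== VERDICT (by name: the statement is the Claim_ definition above) =====
theorem looks_like_vgg_calculate_info_py_spec : Claim_equal_looks_like_vgg_calculate_info_py := by
  intro info _
  unfold Spec_looks_like_vgg_calculate_info_py
  unfold looks_like_vgg_calculate_info_py looks_like_vgg_calculate_info_py_alt
  rw [pv_altLoop_eq]
  simp only [PySem.List.foldl_append_if_eq_filter, List.nil_append, pv_vgg_join,
    List.any_filter, Bool.false_or]
  split <;> simp_all
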